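-- pv_equiv track=rewrite | github.com/oknappett/data_mining | assignment/assignment1.py | clean_rank
-- ===== SOURCE A (Python) =====
-- def clean_rank(rank):
--     '''
--     Function to clean ranks. Groups ranks together to eliminate messy data such as spelling
--
--     Parameters:
--     rank (str): Rank of the individual.
--
--     Returns:
--     str: Cleaned rank.
--
--     Examples:
--         >>> clean_rank('cookstewardandseaman')
--         'steward'
--         >>> clean_rank('captain')
--         'captain'
--         >>> clean_rank('MasterC')
--         'master'
--         >>> clean_rank('carpenterableseaman')
--         'carpenter'
--         >>> clean_rank('blk')
--         'other'
--     '''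
--     # output of ranks, needs to be analysed and changed:
--     # dict_keys(['', 'boatswainmaster', 'runner', 'boy', 'stmate', 'master', 'stengineer', 'seaman', 'masterc', 'onlymate',
--     # 'cape', 'mate', 'cooksteward', 'ndmate', 'cookandableseaman', 'mastervolunteerscertificatec', 'boatswain', 'ordinaryseaman',
--     # 'mateableseaman', 'thengineer', 'botswain', 'purser', 'apprentice', 'bosun', 'skipper', 'secondengineer', 'shipkeeper',
--     # 'stoker', 'ableseaman', 'messroomsteward', 'engineersteward', 'bswain', 'ndhand', 'ordinaryseamancook', 'donkeyman', 'cook',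
--     # 'cookordinaryseaman', 'cookstewardandseaman', 'rdmate', 'pantryboy', 'fireman', 'mater', 'rdhand', 'steward', 'cookstewardseaman',
--     # 'captainmaster', 'captain', 'ndengineer', 'bargeman', 'rdengineer', 'crengineer', 'cookableseaman', 'carpenterseaman', 'blk', 'cookseaman',
--     # 'cookandsteward', 'bosunandlamps', 'radioofficer', 'lamptrimmer', 'masterowner', 'boson', 'assistantengineer', 'stewardcook', 'helmsman', 'carpenterableseaman',
--     # 'mstr', 'donkeyengineoperator', 'matecc', 'mateboatswain', 'cookboy', 'pantrymanfireman', 'stwck', 'firstmate', 'engineer', 'nil', 'ableseamancook', 'ab', 'matepurser',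
--     # 'sl', 'seman', 'ordinary', 'carpenter', 'secondmate', 'boyordinary', 'enigneer', 'mastershipkeeper', 'messroom', 'cabinboy', 'leadingseaman', 'mastercaptain'])
--
--     # change rank to single string with only alpha characters
--     rank = ''.join(c for c in str(rank) if c.isalpha()).lower()
--
--     # change rank to grouped rank
--     match rank:
--         case captain if captain in ['skipper', 'captainmaster', 'captain', 'mastercaptain']:
--             cleaned = 'captain'
--         case purser if purser in ['purser', 'matepurser']:
--             cleaned = 'purser'
--         case master if master in ['master', 'masterc', 'mater', 'captainmaster', 'mstr', 'mastershipkeeper',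
--                                   'mastercaptain', 'mastervolunteerscertificatec']:
--             cleaned = 'master'
--         case boatswain if boatswain in ['boatswainmaster', 'boatswain', 'botswain', 'bswain', 'mateboatswain']:
--             cleaned = 'boatswain'
--         case steward if steward in ['cooksteward', 'messroomsteward', 'engineersteward', 'cookstewardandseaman', 'steward',
--                                     'cookstewardseaman', 'cookandsteward', 'stewardcook', 'stwck']:
--             cleaned = 'steward'
--         case cook if cook in ['cooksteward', 'ordinaryseamancook', 'cook', 'cookordinaryseaman',
--                               'cookstewardandseaman', 'cookstewardseaman', 'cookableseaman',
--                               'cookseaman', 'cookandsteward', 'stewardcook',  'cookboy', 'ableseamancook']: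
--             cleaned = 'cook'
--         case carpenter if carpenter in ['carpenterseaman', 'carpenterableseaman', 'carpenter']:
--             cleaned = 'carpenter'
--         case mate if mate in ['onlymate', 'mate', 'ndmate', 'mateableseaman', 'rdmate', 'matecc', 'firstmate',
--                               'matepurser', 'secondmate', 'stmate']:
--             cleaned = 'mate'
--         case able if able in ['cookandableseaman', 'mateableseaman', 'ableseaman', 'cookableseaman', 'carpenterableseaman',
--                               'ableseamancook']:
--             cleaned = 'able seaman'
--         # seaman = ordinary seaman according to me
--         case ordinary if ordinary in ['seaman', 'ordinaryseaman', 'ordinaryseamancook', 'cookordinaryseaman', 'cookstewardandseaman',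
--                                       'cookstewardseaman', 'cookseaman', 'seman', 'ordinary']:
--             cleaned = 'ordinary seaman'
--         case boy if boy in ['boy', 'pantryboy', 'cookboy', 'boyordinary', 'cabinboy']:
--             cleaned = 'boy'
--         case engineer if engineer in ['stengineer', 'thengineer', 'secondengineer', 'engineersteward', 'ndengineer',
--                                       'rdengineer', 'crengineer', 'assistantengineer', 'engineer', 'enigneer']:
--             cleaned = 'engineer'
--         case fireman if fireman in ['fireman', 'pantrymanfireman']:
--             cleaned = 'fireman'
--         case bosun if bosun in ['bosun', 'bosunandlamps', 'lamptrimmer', 'boson']: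
--             cleaned = 'bosun'
--         case hand if 'hand' in rank:
--             cleaned = 'hand'
--         case _:
--             cleaned = 'other'
--
--     return cleaned
-- ===== SOURCE B (Python) =====
-- # Different algorithm: the 14-branch ordered cascade is replaced by binary
-- # search over one sorted (key, label) table.  The table lists every rank
-- # string the cascade tests, sorted lexicographically; where a rank string
-- # appeared in several categories, the label of the FIRST category in the
-- # original cascade order was kept, which preserves its first-match priority.
-- # The substring/default fallback stays after the failed search.
--
-- _TABLE = [
--     ("ableseaman", "able seaman"), ("ableseamancook", "cook"),
--     ("assistantengineer", "engineer"), ("boatswain", "boatswain"),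
--     ("boatswainmaster", "boatswain"), ("boson", "bosun"),
--     ("bosun", "bosun"), ("bosunandlamps", "bosun"),
--     ("botswain", "boatswain"), ("boy", "boy"),
--     ("boyordinary", "boy"), ("bswain", "boatswain"),
--     ("cabinboy", "boy"), ("captain", "captain"),
--     ("captainmaster", "captain"), ("carpenter", "carpenter"),
--     ("carpenterableseaman", "carpenter"), ("carpenterseaman", "carpenter"),
--     ("cook", "cook"), ("cookableseaman", "cook"),
--     ("cookandableseaman", "able seaman"), ("cookandsteward", "steward"),
--     ("cookboy", "cook"), ("cookordinaryseaman", "cook"),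
--     ("cookseaman", "cook"), ("cooksteward", "steward"),
--     ("cookstewardandseaman", "steward"), ("cookstewardseaman", "steward"),
--     ("crengineer", "engineer"), ("engineer", "engineer"),
--     ("engineersteward", "steward"), ("enigneer", "engineer"),
--     ("fireman", "fireman"), ("firstmate", "mate"),
--     ("lamptrimmer", "bosun"), ("master", "master"),
--     ("masterc", "master"), ("mastercaptain", "captain"),
--     ("mastershipkeeper", "master"), ("mastervolunteerscertificatec", "master"),
--     ("mate", "mate"), ("mateableseaman", "mate"),
--     ("mateboatswain", "boatswain"), ("matecc", "mate"),
--     ("matepurser", "purser"), ("mater", "master"),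
--     ("messroomsteward", "steward"), ("mstr", "master"),
--     ("ndengineer", "engineer"), ("ndmate", "mate"),
--     ("onlymate", "mate"), ("ordinary", "ordinary seaman"),
--     ("ordinaryseaman", "ordinary seaman"), ("ordinaryseamancook", "cook"),
--     ("pantryboy", "boy"), ("pantrymanfireman", "fireman"),
--     ("purser", "purser"), ("rdengineer", "engineer"),
--     ("rdmate", "mate"), ("seaman", "ordinary seaman"),
--     ("secondengineer", "engineer"), ("secondmate", "mate"),
--     ("seman", "ordinary seaman"), ("skipper", "captain"),
--     ("stengineer", "engineer"), ("steward", "steward"),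
--     ("stewardcook", "steward"), ("stmate", "mate"),
--     ("stwck", "steward"), ("thengineer", "engineer"),
-- ]
--
--
-- def _search(r, lo, hi):
--     """Binary search for r in the sorted _TABLE; label or None."""
--     if lo >= hi:
--         return None
--     mid = (lo + hi) // 2
--     key, label = _TABLE[mid]
--     if key == r:
--         return label
--     if key < r:
--         return _search(r, mid + 1, hi)
--     return _search(r, lo, mid)
--
--
-- def clean_rank(rank):
--     rank = ''.join(c for c in str(rank) if c.isalpha()).lower()
--     cleaned = _search(rank, 0, len(_TABLE))
--     if cleaned is None:
--         cleaned = 'hand' if 'hand' in rank else 'other'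
--     return cleaned
-- ===== Notes on version B (the rewrite author's own statement) =====
-- stated objective: alternative
-- what changed: Replaced the 14-branch ordered match/case cascade with recursive binary search over one lexicographically sorted (rank, label) table (first-match priority baked into the table when building it), keeping the substring fallback after a failed search.
import Mathlib
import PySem

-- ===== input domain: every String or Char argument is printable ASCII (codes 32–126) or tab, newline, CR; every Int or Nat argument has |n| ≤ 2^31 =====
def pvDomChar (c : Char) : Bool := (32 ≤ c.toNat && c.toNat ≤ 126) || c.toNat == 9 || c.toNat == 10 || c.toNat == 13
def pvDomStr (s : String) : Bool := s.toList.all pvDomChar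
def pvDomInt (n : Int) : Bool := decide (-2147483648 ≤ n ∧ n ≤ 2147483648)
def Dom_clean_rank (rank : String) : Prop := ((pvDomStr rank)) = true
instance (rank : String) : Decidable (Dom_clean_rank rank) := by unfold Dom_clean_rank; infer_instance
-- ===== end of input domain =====

-- B replaces A's 14-branch ordered cascade by binary search over one sorted
-- (rank, label) table; objective: alternative algorithm.

-- ===== PORT A =====
-- ''.join(c for c in str(rank) if c.isalpha()).lower()
def pvCleanA (rank : String) : String :=
  String.mk (PySem.Chars.lower (rank.toList.filter (fun c => PySem.Chars.isalpha c)))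

def pvCascade (r : String) : String :=
  if r ∈ ["skipper", "captainmaster", "captain", "mastercaptain"] then "captain"
  else if r ∈ ["purser", "matepurser"] then "purser"
  else if r ∈ ["master", "masterc", "mater", "captainmaster", "mstr", "mastershipkeeper",
               "mastercaptain", "mastervolunteerscertificatec"] then "master"
  else if r ∈ ["boatswainmaster", "boatswain", "botswain", "bswain", "mateboatswain"] then "boatswain"
  else if r ∈ ["cooksteward", "messroomsteward", "engineersteward", "cookstewardandseaman", "steward",
               "cookstewardseaman", "cookandsteward", "stewardcook", "stwck"] then "steward"
  else if r ∈ ["cooksteward", "ordinaryseamancook", "cook", "cookordinaryseaman",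
               "cookstewardandseaman", "cookstewardseaman", "cookableseaman",
               "cookseaman", "cookandsteward", "stewardcook", "cookboy", "ableseamancook"] then "cook"
  else if r ∈ ["carpenterseaman", "carpenterableseaman", "carpenter"] then "carpenter"
  else if r ∈ ["onlymate", "mate", "ndmate", "mateableseaman", "rdmate", "matecc", "firstmate",
               "matepurser", "secondmate", "stmate"] then "mate"
  else if r ∈ ["cookandableseaman", "mateableseaman", "ableseaman", "cookableseaman",
               "carpenterableseaman", "ableseamancook"] then "able seaman"
  else if r ∈ ["seaman", "ordinaryseaman", "ordinaryseamancook", "cookordinaryseaman",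
               "cookstewardandseaman", "cookstewardseaman", "cookseaman", "seman", "ordinary"] then "ordinary seaman"
  else if r ∈ ["boy", "pantryboy", "cookboy", "boyordinary", "cabinboy"] then "boy"
  else if r ∈ ["stengineer", "thengineer", "secondengineer", "engineersteward", "ndengineer",
               "rdengineer", "crengineer", "assistantengineer", "engineer", "enigneer"] then "engineer"
  else if r ∈ ["fireman", "pantrymanfireman"] then "fireman"
  else if r ∈ ["bosun", "bosunandlamps", "lamptrimmer", "boson"] then "bosun"
  else if PySem.Str.isIn "hand" r then "hand"
  else "other"

def clean_rank (rank : String) : String := pvCascade (pvCleanA rank)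

-- ===== PORT B =====
-- _TABLE: one sorted (rank, label) table, literal as in Source B
def pvTable : List (String × String) :=
  [ ("ableseaman", "able seaman"), ("ableseamancook", "cook"),
    ("assistantengineer", "engineer"), ("boatswain", "boatswain"),
    ("boatswainmaster", "boatswain"), ("boson", "bosun"),
    ("bosun", "bosun"), ("bosunandlamps", "bosun"),
    ("botswain", "boatswain"), ("boy", "boy"),
    ("boyordinary", "boy"), ("bswain", "boatswain"),
    ("cabinboy", "boy"), ("captain", "captain"),
    ("captainmaster", "captain"), ("carpenter", "carpenter"),
    ("carpenterableseaman", "carpenter"), ("carpenterseaman", "carpenter"),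
    ("cook", "cook"), ("cookableseaman", "cook"),
    ("cookandableseaman", "able seaman"), ("cookandsteward", "steward"),
    ("cookboy", "cook"), ("cookordinaryseaman", "cook"),
    ("cookseaman", "cook"), ("cooksteward", "steward"),
    ("cookstewardandseaman", "steward"), ("cookstewardseaman", "steward"),
    ("crengineer", "engineer"), ("engineer", "engineer"),
    ("engineersteward", "steward"), ("enigneer", "engineer"),
    ("fireman", "fireman"), ("firstmate", "mate"),
    ("lamptrimmer", "bosun"), ("master", "master"),
    ("masterc", "master"), ("mastercaptain", "captain"),
    ("mastershipkeeper", "master"), ("mastervolunteerscertificatec", "master"),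
    ("mate", "mate"), ("mateableseaman", "mate"),
    ("mateboatswain", "boatswain"), ("matecc", "mate"),
    ("matepurser", "purser"), ("mater", "master"),
    ("messroomsteward", "steward"), ("mstr", "master"),
    ("ndengineer", "engineer"), ("ndmate", "mate"),
    ("onlymate", "mate"), ("ordinary", "ordinary seaman"),
    ("ordinaryseaman", "ordinary seaman"), ("ordinaryseamancook", "cook"),
    ("pantryboy", "boy"), ("pantrymanfireman", "fireman"),
    ("purser", "purser"), ("rdengineer", "engineer"),
    ("rdmate", "mate"), ("seaman", "ordinary seaman"),
    ("secondengineer", "engineer"), ("secondmate", "mate"),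
    ("seman", "ordinary seaman"), ("skipper", "captain"),
    ("stengineer", "engineer"), ("steward", "steward"),
    ("stewardcook", "steward"), ("stmate", "mate"),
    ("stwck", "steward"), ("thengineer", "engineer") ]

-- _search(r, lo, hi): recursive binary search; the fuel parameter only makes
-- the recursion structural (hi - lo shrinks every call, so fuel = hi - lo at
-- the top call is never exhausted) — it adds no behaviour.  Python's str '<'
-- is codepoint-lexicographic, exactly List.lt on the char lists.
def pvSearch : Nat → String → Nat → Nat → Option String
  | 0, _, _, _ => none
  | fuel + 1, r, lo, hi =>
    if lo < hi then
      match pvTable[(lo + hi) / 2]? with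
      | some kv =>
        if kv.1 = r then some kv.2
        else if kv.1.toList < r.toList then pvSearch fuel r ((lo + hi) / 2 + 1) hi
        else pvSearch fuel r lo ((lo + hi) / 2)
      | none => none
    else none

def clean_rank_alt (rank : String) : String :=
  let r := String.mk (PySem.Chars.lower (rank.toList.filter (fun c => PySem.Chars.isalpha c)))
  match pvSearch pvTable.length r 0 pvTable.length with
  | some v => v
  | none => if PySem.Str.isIn "hand" r then "hand" else "other"

-- ===== PRECONDITION & SPEC =====
def Spec_clean_rank (rank : String) (out : String) : Prop := out = clean_rank_alt rank
instance (rank : String) (out : String) : Decidable (Spec_clean_rank rank out) := by unfold Spec_clean_rank; infer_instance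

-- ===== CLAIM (what is proved, stated in full; the proofs are below) =====
def Claim_equal_clean_rank : Prop := ∀ (rank : String), Dom_clean_rank rank → Spec_clean_rank rank (clean_rank rank)

-- ===== LEMMAS AND PROOFS =====

-- All strings the cascade tests for.
def pvAllKeys : List String :=
  ["skipper", "captainmaster", "captain", "mastercaptain",
   "purser", "matepurser",
   "master", "masterc", "mater", "mstr", "mastershipkeeper", "mastervolunteerscertificatec",
   "boatswainmaster", "boatswain", "botswain", "bswain", "mateboatswain",
   "cooksteward", "messroomsteward", "engineersteward", "cookstewardandseaman", "steward",
   "cookstewardseaman", "cookandsteward", "stewardcook", "stwck",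
   "ordinaryseamancook", "cook", "cookordinaryseaman", "cookableseaman", "cookseaman",
   "cookboy", "ableseamancook",
   "carpenterseaman", "carpenterableseaman", "carpenter",
   "onlymate", "mate", "ndmate", "mateableseaman", "rdmate", "matecc", "firstmate",
   "matepurser", "secondmate", "stmate",
   "cookandableseaman", "ableseaman",
   "seaman", "ordinaryseaman", "seman", "ordinary",
   "boy", "pantryboy", "boyordinary", "cabinboy",
   "stengineer", "thengineer", "secondengineer", "ndengineer", "rdengineer", "crengineer",
   "assistantengineer", "engineer", "enigneer",
   "fireman", "pantrymanfireman",
   "bosun", "bosunandlamps", "lamptrimmer", "boson"]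

set_option maxRecDepth 100000 in
theorem pvPos : ∀ r ∈ pvAllKeys,
    pvCascade r = (match pvSearch pvTable.length r 0 pvTable.length with
      | some v => v
      | none => if PySem.Str.isIn "hand" r then "hand" else "other") := by
  decide

-- if the search returns a label, the query is one of the table's keys
theorem pvSearch_some_mem (r v : String) :
    ∀ fuel lo hi, pvSearch fuel r lo hi = some v → r ∈ pvTable.map Prod.fst := by
  intro fuel
  induction fuel with
  | zero => intro lo hi h; simp [pvSearch] at h
  | succ n ih =>
    intro lo hi h
    rw [pvSearch] at h
    split at h
    · split at h
      · rename_i kv hm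
        split at h
        · rename_i he
          exact he ▸ List.mem_map_of_mem (List.mem_of_getElem? hm)
        · split at h
          · exact ih _ _ h
          · exact ih _ _ h
      · exact absurd h (by simp)
    · exact absurd h (by simp)

set_option maxRecDepth 100000 in
theorem pvTableKeys : ∀ k ∈ pvTable.map Prod.fst, k ∈ pvAllKeys := by decide

theorem pvNeg (r : String) (hk : r ∉ pvAllKeys) :
    pvCascade r = (match pvSearch pvTable.length r 0 pvTable.length with
      | some v => v
      | none => if PySem.Str.isIn "hand" r then "hand" else "other") := by
  have hnone : pvSearch pvTable.length r 0 pvTable.length = none := by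
    cases hv : pvSearch pvTable.length r 0 pvTable.length with
    | none => rfl
    | some v => exact absurd (pvTableKeys r (pvSearch_some_mem r v _ _ _ hv)) hk
  have hmem : ∀ L : List String, (∀ x ∈ L, x ∈ pvAllKeys) → r ∉ L :=
    fun L hL hr => hk (hL r hr)
  rw [hnone]
  unfold pvCascade
  rw [if_neg (hmem _ (by decide)), if_neg (hmem _ (by decide)), if_neg (hmem _ (by decide)),
      if_neg (hmem _ (by decide)), if_neg (hmem _ (by decide)), if_neg (hmem _ (by decide)),
      if_neg (hmem _ (by decide)), if_neg (hmem _ (by decide)), if_neg (hmem _ (by decide)),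
      if_neg (hmem _ (by decide)), if_neg (hmem _ (by decide)), if_neg (hmem _ (by decide)),
      if_neg (hmem _ (by decide)), if_neg (hmem _ (by decide))]

-- ===== VERDICT (by name: the statement is the Claim_ definition above) =====
set_option maxRecDepth 100000 in
theorem clean_rank_spec : Claim_equal_clean_rank := by
  intro rank _
  unfold Spec_clean_rank clean_rank clean_rank_alt
  by_cases hk : pvCleanA rank ∈ pvAllKeys
  · exact pvPos _ hk
  · exact pvNeg _ hk
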